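-- pv_equiv track=rewrite | github.com/TrellixVulnTeam/data-science-from-scratch_A1J4 | src/mapreduce.py | matrix_multiply_reducer
-- ===== SOURCE A (Python) =====
-- from typing import (
--     Any,
--     List,
--     Tuple,
--     Iterator,
--     Iterable,
--     Callable,
--     NamedTuple
-- )
-- from collections import defaultdict, Counter
--
-- def matrix_multiply_reducer(key: Tuple[int, int],
--                             indexed_values: Iterable[Tuple[int, int]]):
--     results_by_index = defaultdict(list)
--
--     for index, value in indexed_values:
--         results_by_index[index].append(value)
--
--     # Multiply the values for positions with two values
--     # (one from A, and one from B) and sum them up.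
--     sumproduct = sum(values[0] * values[1]
--                      for values in results_by_index.values()
--                      if len(values) == 2)
--
--     if sumproduct != 0.0:
--         yield (key, sumproduct)
-- ===== SOURCE B (Python) =====
-- def matrix_multiply_reducer(key, indexed_values):
--     # Dict-free: scan the pairs; at each first occurrence of an index,
--     # collect that index's values by a filter pass and add the product
--     # of exactly-two-value groups to a running sum.
--     pairs = list(indexed_values)
--     seen = set()
--     sumproduct = 0
--     for index, _ in pairs:
--         if index not in seen:
--             seen.add(index)
--             vals = [v for j, v in pairs if j == index]
--             if len(vals) == 2:
--                 sumproduct += vals[0] * vals[1]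
--     if sumproduct != 0.0:
--         yield (key, sumproduct)
-- ===== Notes on version B (the rewrite author's own statement) =====
-- stated objective: alternative
-- what changed: Replaces A's defaultdict grouping (build index->values lists, then sum over dict values) by a dict-free scan that, at each first occurrence of an index, collects that index's values with a filter pass over the pairs and accumulates the product of exactly-two-value groups directly.
import Mathlib
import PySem

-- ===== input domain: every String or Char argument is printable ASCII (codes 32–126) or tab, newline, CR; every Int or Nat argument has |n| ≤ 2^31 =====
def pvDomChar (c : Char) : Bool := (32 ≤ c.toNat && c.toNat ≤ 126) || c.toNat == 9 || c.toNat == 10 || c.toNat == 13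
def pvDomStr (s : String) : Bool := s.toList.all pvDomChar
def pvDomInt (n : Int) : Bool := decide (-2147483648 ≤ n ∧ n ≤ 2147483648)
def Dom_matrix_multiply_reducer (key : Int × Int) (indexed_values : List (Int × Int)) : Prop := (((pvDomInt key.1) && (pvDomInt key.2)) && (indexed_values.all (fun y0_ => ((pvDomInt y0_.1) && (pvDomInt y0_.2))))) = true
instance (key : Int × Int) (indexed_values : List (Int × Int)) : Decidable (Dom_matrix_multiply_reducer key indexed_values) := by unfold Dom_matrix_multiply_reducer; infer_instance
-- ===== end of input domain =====

-- B replaces A's defaultdict grouping by a dict-free scan that, at each first occurrence of an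
-- index, collects that index's values with a filter pass (objective: alternative; both generators
-- yield the same single pair, proved about the returned list of yields).

-- ===== PORT A =====
def matrix_multiply_reducer (key : Int × Int) (indexed_values : List (Int × Int)) : List ((Int × Int) × Int) :=
  -- results_by_index = defaultdict(list); for index, value in indexed_values: results_by_index[index].append(value)
  let results_by_index : PySem.Dict Int (List Int) :=
    indexed_values.foldl (fun d p => d.modify p.1 ([] : List Int) (fun vs => vs ++ [p.2])) PySem.Dict.empty
  -- sumproduct = sum(values[0] * values[1] for values in results_by_index.values() if len(values) == 2)
  let sumproduct : Int :=
    (((results_by_index.values).filter (fun values => values.length == 2)).map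
      (fun values => PySem.List.pyGetD values 0 0 * PySem.List.pyGetD values 1 0)).sum
  -- if sumproduct != 0.0: yield (key, sumproduct)
  if sumproduct ≠ 0 then [(key, sumproduct)] else []

-- ===== PORT B =====
-- one loop step of Source B: a first occurrence of an index triggers the filter pass over all pairs
def pvBStep (pairs : List (Int × Int)) (st : PySem.Set Int × Int) (p : Int × Int) : PySem.Set Int × Int :=
  if PySem.Set.contains st.1 p.1 then st
  else
    let vals := (pairs.filter (fun q => q.1 == p.1)).map (fun q => q.2)
    (PySem.Set.add st.1 p.1,
      if vals.length == 2 then st.2 + PySem.List.pyGetD vals 0 0 * PySem.List.pyGetD vals 1 0 else st.2)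

def matrix_multiply_reducer_alt (key : Int × Int) (indexed_values : List (Int × Int)) : List ((Int × Int) × Int) :=
  let st := indexed_values.foldl (pvBStep indexed_values) (PySem.Set.empty, (0 : Int))
  if st.2 ≠ 0 then [(key, st.2)] else []

-- ===== PRECONDITION & SPEC =====
def Spec_matrix_multiply_reducer (key : Int × Int) (indexed_values : List (Int × Int)) (out : List ((Int × Int) × Int)) : Prop := out = matrix_multiply_reducer_alt key indexed_values
instance (key : Int × Int) (indexed_values : List (Int × Int)) (out : List ((Int × Int) × Int)) : Decidable (Spec_matrix_multiply_reducer key indexed_values out) := by unfold Spec_matrix_multiply_reducer; infer_instance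

-- ===== CLAIM (what is proved, stated in full; the proofs are below) =====
def Claim_equal_matrix_multiply_reducer : Prop := ∀ (key : Int × Int) (indexed_values : List (Int × Int)), Dom_matrix_multiply_reducer key indexed_values → Spec_matrix_multiply_reducer key indexed_values (matrix_multiply_reducer key indexed_values)

-- ===== LEMMAS AND PROOFS =====

-- the value group of an index, and its contribution to the sum (0 unless the group has exactly two values)
def pvVals (pairs : List (Int × Int)) (k : Int) : List Int :=
  (pairs.filter (fun q => q.1 == k)).map (fun q => q.2)

def pvContrib (pairs : List (Int × Int)) (k : Int) : Int :=
  if (pvVals pairs k).length == 2 then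
    PySem.List.pyGetD (pvVals pairs k) 0 0 * PySem.List.pyGetD (pvVals pairs k) 1 0
  else 0

-- membership in seen.add(x), pointwise, as a Bool equation
lemma pv_contains_add (seen : PySem.Set Int) (x a : Int) :
    (!(PySem.Set.contains (PySem.Set.add seen x) a)) = ((!(a == x)) && !(PySem.Set.contains seen a)) := by
  by_cases hx : a = x
  · subst hx
    by_cases hm : a ∈ seen <;> simp [PySem.Set.add, PySem.Set.contains, hm]
  · by_cases hm : x ∈ seen <;> simp [PySem.Set.add, PySem.Set.contains, hm, hx]

-- filtering the not-yet-seen keys commutes with adding x to seen / discarding x from the candidates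
lemma pv_filter_add_discard (S seen : List Int) (x : Int) :
    S.filter (fun k => !(PySem.Set.contains (PySem.Set.add seen x) k)) =
    (PySem.Set.discard S x).filter (fun k => !(PySem.Set.contains seen k)) := by
  simp only [PySem.Set.discard, List.filter_filter]
  refine List.filter_congr (fun a _ => ?_)
  rw [pv_contains_add, Bool.and_comm]

-- discarding an already-seen key does not change the not-yet-seen filter
lemma pv_filter_discard_seen (S seen : List Int) (x : Int)
    (h : PySem.Set.contains seen x = true) :
    (PySem.Set.discard S x).filter (fun k => !(PySem.Set.contains seen k)) =
    S.filter (fun k => !(PySem.Set.contains seen k)) := by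
  simp only [PySem.Set.discard, List.filter_filter]
  refine List.filter_congr (fun a _ => ?_)
  by_cases hx : a = x
  · subst hx; simp [(PySem.Set.contains_iff seen a).mp h]
  · simp [hx]

-- the loop of B: seen becomes seen ∪ the indices, and the sum grows by the contribution of every new index
lemma pv_loop (pairs : List (Int × Int)) : ∀ (l : List (Int × Int)) (seen : PySem.Set Int) (acc : Int),
    l.foldl (pvBStep pairs) (seen, acc) =
      (PySem.Set.update seen (l.map (fun q => q.1)),
       acc + (((PySem.Set.ofList (l.map (fun q => q.1))).filter
                (fun k => !(PySem.Set.contains seen k))).map (pvContrib pairs)).sum) := by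
  intro l
  induction l with
  | nil => intro seen acc; simp [PySem.Set.update, PySem.Set.ofList]
  | cons p l ih =>
    intro seen acc
    simp only [List.foldl_cons, List.map_cons, PySem.Set.update_cons, PySem.Set.ofList_cons]
    by_cases h : PySem.Set.contains seen p.1 = true
    · have hmem : p.1 ∈ seen := (PySem.Set.contains_iff seen p.1).mp h
      rw [show pvBStep pairs (seen, acc) p = (seen, acc) by unfold pvBStep; rw [h, if_pos rfl]]
      rw [ih seen acc, PySem.Set.add_of_mem hmem]
      rw [List.filter_cons_of_neg (by simp [hmem]), pv_filter_discard_seen _ _ _ h]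
    · have hF : PySem.Set.contains seen p.1 = false := by
        cases hc : PySem.Set.contains seen p.1
        · rfl
        · exact absurd hc h
      rw [show pvBStep pairs (seen, acc) p = (PySem.Set.add seen p.1, acc + pvContrib pairs p.1) by
        unfold pvBStep; rw [hF, if_neg (by simp)]
        unfold pvContrib pvVals
        split_ifs with hc <;> simp_all]
      have hnm : p.1 ∉ seen := fun hm => h ((PySem.Set.contains_iff seen p.1).mpr hm)
      rw [ih (PySem.Set.add seen p.1) (acc + pvContrib pairs p.1)]
      rw [List.filter_cons_of_pos (by simp [hnm])]
      rw [pv_filter_add_discard]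
      simp [add_assoc]

-- summing the contributions equals filtering the exactly-two groups and summing their products
lemma pv_sum_contrib (pairs : List (Int × Int)) (l : List Int) :
    (l.map (pvContrib pairs)).sum =
    ((l.filter (fun k => (pvVals pairs k).length == 2)).map
      (fun k => PySem.List.pyGetD (pvVals pairs k) 0 0 * PySem.List.pyGetD (pvVals pairs k) 1 0)).sum := by
  induction l with
  | nil => rfl
  | cons a l ih =>
    by_cases hc : ((pvVals pairs a).length == 2) = true
    · simp [hc, ih, pvContrib]
    · simp [hc, ih, pvContrib]

-- A's sum, written over the distinct indices
lemma pv_A_sum (iv : List (Int × Int)) :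
    ((((iv.foldl (fun d p => d.modify p.1 ([] : List Int) (fun vs => vs ++ [p.2]))
          PySem.Dict.empty).values).filter (fun values => values.length == 2)).map
      (fun values => PySem.List.pyGetD values 0 0 * PySem.List.pyGetD values 1 0)).sum =
    (((PySem.Set.ofList (iv.map (fun q => q.1))).filter
        (fun k => (pvVals iv k).length == 2)).map
      (fun k => PySem.List.pyGetD (pvVals iv k) 0 0 * PySem.List.pyGetD (pvVals iv k) 1 0)).sum := by
  set d : PySem.Dict Int (List Int) :=
    iv.foldl (fun d p => d.modify p.1 ([] : List Int) (fun vs => vs ++ [p.2])) PySem.Dict.empty with hd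
  have hkeys : d.keys = PySem.Set.ofList (iv.map (fun q => q.1)) := by
    have := PySem.Dict.keys_foldl_modify_key iv (fun q : Int × Int => q.1) ([] : List Int)
      (fun _ p => (fun vs => vs ++ [p.2])) PySem.Dict.empty
    simpa [← hd, PySem.Dict.keys_empty, PySem.Set.update_empty] using this
  have hnd : d.keys.Nodup := by
    rw [hkeys]; exact PySem.Set.nodup_ofList _
  have hget : ∀ k, d.getD k [] = pvVals iv k := by
    intro k
    have := PySem.Dict.getD_foldl_modify_append iv PySem.Dict.empty k
    simpa [← hd, PySem.Dict.getD_empty, pvVals] using this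
  have hvals : d.values = (PySem.Set.ofList (iv.map (fun q => q.1))).map (pvVals iv) := by
    rw [PySem.Dict.values_eq_map_keys d hnd ([] : List Int), hkeys]
    exact List.map_congr_left (fun k _ => hget k)
  rw [hvals, List.filter_map, List.map_map]
  rfl

-- ===== VERDICT (by name: the statement is the Claim_ definition above) =====
theorem matrix_multiply_reducer_spec : Claim_equal_matrix_multiply_reducer := by
  intro key iv _
  unfold Spec_matrix_multiply_reducer
  simp only [matrix_multiply_reducer, matrix_multiply_reducer_alt]
  rw [pv_loop iv iv PySem.Set.empty 0]
  have hempty : (fun k : Int => !(PySem.Set.contains PySem.Set.empty k)) = (fun _ : Int => true) := by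
    funext k; simp [PySem.Set.contains, PySem.Set.empty]
  rw [pv_A_sum iv, hempty, List.filter_true, pv_sum_contrib iv, zero_add]
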